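-- pv_equiv track=rewrite | github.com/Zeba-1/Chess_game | deterPiece.py | deterLignediag
-- ===== SOURCE A (Python) =====
-- def regarde_piece(coorDeplacement, lstPieces, needPieces = False):
--     """
--     Fonction qui check si une piece se trouve sur la case demander,
--     si il y'en a une on renvoie False, sinon on renvois True. On peut
--     aussi récuperer la piece qui se trouve sur la case si il y'en a une
--     :param: coorDeplacement tuple, lstPieces dict, needPieces bool
--     :return: bool, None or lst
--
--     >>> reagarde_piece((0, 4), {'pwhite': [(0,6), (1,1)], 'pblack': [(1, 2)]})
--     False
--     >>> reagarde_piece((0, 4), {'pwhite': [(0,6), (1,1)], 'pblack': [(0, 4)]}, True)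
--     False, ['pblack', (0,4)]
--     >>> reagarde_piece((0, 3), {'pwhite': [(0,6), (1,1)], 'pblack': [(1, 2)]})
--     True, None
--     """
--     x, y = coorDeplacement
--     if (0 > x or x > 7) or (0 > y or y > 7):
--         return False, None
--
--     for piece, coorPiece in lstPieces.items():
--         for coordonne in coorPiece:
--             if coorDeplacement == coordonne:
--                 if needPieces:
--                     return False, [piece, coordonne]
--                 else:
--                     return False
--
--     return True, None
--
-- def deterLignediag(coorP, colorP, direction, lstPieces, doOnce = False):
--     """
--     Foncrion permetant qui determine les deplacement en diagonal et les
--     deplacement sur les lignes. elle ne peut determiner qu'une seul direction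
--     a la fois !!!!!!! il faut donc appeller la fonction 8 fois pour determiner
--     toute les lignes de la dames ou du roi !
--     Pour le roi on utilise 'doOnce' pour calculer suelement une fois dans la
--     direction voulue
--     :param: coorP tuple, colorP stringn, direction int, lstPieces dict,
--     doOnce bool
--     :return: lst
--     """
--     lstMoov = []
--     xP, yP = coorP
--     x, y = direction
--     attackPiece = None
--
--     xP += x
--     yP += y
--     moovOk, attackPiece = regarde_piece((xP, yP), lstPieces, True)
--     while moovOk:
--         lstMoov.append((xP, yP))
--         xP += x
--         yP += y
--         if doOnce:
--             moovOk = False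
--             break
--         moovOk, attackPiece = regarde_piece((xP, yP), lstPieces, True)
--
--     if attackPiece != None:
--         if attackPiece[0][1:] != colorP:
--             lstMoov.append((xP, yP))
--
--     return lstMoov
-- ===== SOURCE B (Python) =====
-- def deterLignediag(coorP, colorP, direction, lstPieces, doOnce = False):
--     # Staged geometry-then-occupancy approach: (1) build the geometric ray of
--     # consecutive on-board squares along the direction (bounded: with a nonzero
--     # direction 9 steps always leave the board), (2) index piece colors by
--     # coordinate (first occurrence wins, as in A's dict scan) and locate the
--     # first occupied square on the ray, (3) slice: the free prefix plus the
--     # blocking square when it holds an enemy piece.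
--     x0, y0 = coorP
--     dx, dy = direction
--     ray = []
--     for k in range(1, 2 if doOnce else 10):
--         sq = (x0 + k * dx, y0 + k * dy)
--         if not (0 <= sq[0] <= 7 and 0 <= sq[1] <= 7):
--             break
--         ray.append(sq)
--     color_at = {}
--     for piece, coords in lstPieces.items():
--         for c in coords:
--             color_at.setdefault(c, piece[1:])
--     hit = next(((i, sq) for i, sq in enumerate(ray) if sq in color_at), None)
--     if hit is None:
--         return ray
--     i, sq = hit
--     moves = ray[:i]
--     if color_at[sq] != colorP:
--         moves.append(sq)
--     return moves
-- ===== Notes on version B (the rewrite author's own statement) =====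
-- stated objective: alternative
-- what changed: B is staged: it first builds the geometric ray of consecutive on-board squares along the direction, separately indexes piece colors by coordinate, then locates the first occupied square on the ray and returns the free prefix plus an optional capture via a slice, instead of A's single while loop that re-scans the whole piece dict at every step and patches the capture in after the loop.
import Mathlib
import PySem

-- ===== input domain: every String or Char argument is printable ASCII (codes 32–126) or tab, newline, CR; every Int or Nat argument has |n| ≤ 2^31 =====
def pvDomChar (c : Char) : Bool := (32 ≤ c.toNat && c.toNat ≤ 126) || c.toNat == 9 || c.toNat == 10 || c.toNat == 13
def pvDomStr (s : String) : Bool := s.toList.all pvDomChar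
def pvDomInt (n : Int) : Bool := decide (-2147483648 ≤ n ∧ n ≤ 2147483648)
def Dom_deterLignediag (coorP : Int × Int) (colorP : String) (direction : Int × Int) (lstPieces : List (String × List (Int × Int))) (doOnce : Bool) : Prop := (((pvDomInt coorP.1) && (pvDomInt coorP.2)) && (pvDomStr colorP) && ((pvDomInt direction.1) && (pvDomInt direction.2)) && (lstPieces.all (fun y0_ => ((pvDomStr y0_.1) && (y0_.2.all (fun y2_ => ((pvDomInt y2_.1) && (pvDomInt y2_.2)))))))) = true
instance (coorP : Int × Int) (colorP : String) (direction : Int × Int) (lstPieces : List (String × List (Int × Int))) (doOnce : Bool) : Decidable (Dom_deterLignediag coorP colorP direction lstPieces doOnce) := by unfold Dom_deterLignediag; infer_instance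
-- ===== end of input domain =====

-- B stages the computation — geometric ray first, coordinate→color index second,
-- then one search-and-slice — instead of A's while loop that re-scans the piece
-- dict at every square and patches the capture in after the loop (objective: alternative).

-- ===== PORT A =====
-- inner 'for coordonne in coorPiece' scan of regarde_piece, and the outer dict scan;
-- regarde_piece is ported at needPieces=True, the only way A calls it (with
-- needPieces=False the Python returns a bare bool, which has no place in this type).
def rpScan (coor : Int × Int) : List (String × List (Int × Int)) → Bool × Option (String × (Int × Int))
  | [] => (true, none)
  | (piece, coorPiece) :: rest =>
      match coorPiece.find? (fun coordonne => coordonne == coor) with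
      | some coordonne => (false, some (piece, coordonne))
      | none => rpScan coor rest

def regardePiece (coor : Int × Int) (lstPieces : List (String × List (Int × Int))) : Bool × Option (String × (Int × Int)) :=
  if 0 > coor.1 ∨ coor.1 > 7 ∨ 0 > coor.2 ∨ coor.2 > 7 then (false, none)
  else rpScan coor lstPieces

-- A's while loop; fuel 9 suffices on Pre_ (the loop body runs at most 9 times there)
def loopA (dx dy : Int) (lstPieces : List (String × List (Int × Int))) (doOnce : Bool) :
    Nat → List (Int × Int) → Bool → Option (String × (Int × Int)) → Int → Int →
    List (Int × Int) × Int × Int × Option (String × (Int × Int))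
  | 0, lstMoov, _, attackPiece, xP, yP => (lstMoov, xP, yP, attackPiece)
  | n + 1, lstMoov, moovOk, attackPiece, xP, yP =>
      if moovOk then
        let lstMoov := lstMoov ++ [(xP, yP)]
        let xP := xP + dx
        let yP := yP + dy
        if doOnce then (lstMoov, xP, yP, attackPiece)
        else
          let r := regardePiece (xP, yP) lstPieces
          loopA dx dy lstPieces doOnce n lstMoov r.1 r.2 xP yP
      else (lstMoov, xP, yP, attackPiece)

def deterLignediag (coorP : Int × Int) (colorP : String) (direction : Int × Int) (lstPieces : List (String × List (Int × Int))) (doOnce : Bool) : List (Int × Int) :=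
  let xP := coorP.1 + direction.1
  let yP := coorP.2 + direction.2
  let r := regardePiece (xP, yP) lstPieces
  let st := loopA direction.1 direction.2 lstPieces doOnce 9 [] r.1 r.2 xP yP
  match st.2.2.2 with
  | some attackPiece =>
      if PySem.Str.slice attackPiece.1 (some 1) none ≠ colorP then st.1 ++ [(st.2.1, st.2.2.1)] else st.1
  | none => st.1

-- ===== PORT B =====
-- stage 1: the geometric ray — 'for k in range(1, 2 if doOnce else 10): … break'
-- (fuel counts remaining iterations, k the current step index)
def buildRay (x0 y0 dx dy : Int) : Nat → Nat → List (Int × Int)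
  | 0, _ => []
  | n + 1, k =>
      let sq := (x0 + (k : Int) * dx, y0 + (k : Int) * dy)
      if 0 ≤ sq.1 ∧ sq.1 ≤ 7 ∧ 0 ≤ sq.2 ∧ sq.2 ≤ 7 then sq :: buildRay x0 y0 dx dy n (k + 1)
      else []

-- stage 2: 'color_at.setdefault(c, piece[1:])' over the dict
def colorAt (lstPieces : List (String × List (Int × Int))) : PySem.Dict (Int × Int) String :=
  lstPieces.foldl (fun d pc => pc.2.foldl (fun d c => d.setdefault c (PySem.Str.slice pc.1 (some 1) none)) d) PySem.Dict.empty

-- 'next(((i, sq) for i, sq in enumerate(ray) if sq in color_at), None)'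
def firstHit (occ : PySem.Dict (Int × Int) String) : List (Int × Int) → Nat → Option (Nat × (Int × Int))
  | [], _ => none
  | sq :: rest, i => if (occ.get? sq).isSome then some (i, sq) else firstHit occ rest (i + 1)

def deterLignediag_alt (coorP : Int × Int) (colorP : String) (direction : Int × Int) (lstPieces : List (String × List (Int × Int))) (doOnce : Bool) : List (Int × Int) :=
  let ray := buildRay coorP.1 coorP.2 direction.1 direction.2 (if doOnce then 1 else 9) 1
  let occ := colorAt lstPieces
  match firstHit occ ray 0 with
  | none => ray
  | some (i, sq) =>
      -- ray[:i] with i ≥ 0 is List.take i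
      let moves := ray.take i
      match occ.get? sq with   -- color_at[sq]: present by construction of firstHit
      | some c => if c ≠ colorP then moves ++ [sq] else moves
      | none => moves

-- ===== PRECONDITION & SPEC =====
-- Pre_ excludes only the inputs on which A DIVERGES (infinite while loop): direction
-- (0,0) with doOnce=False and the piece's own square on-board and unoccupied.
def Pre_deterLignediag (coorP : Int × Int) (colorP : String) (direction : Int × Int) (lstPieces : List (String × List (Int × Int))) (doOnce : Bool) : Prop :=
  doOnce = true ∨ direction ≠ (0, 0) ∨
    ¬ (0 ≤ coorP.1 ∧ coorP.1 ≤ 7 ∧ 0 ≤ coorP.2 ∧ coorP.2 ≤ 7 ∧ ∀ pc ∈ lstPieces, coorP ∉ pc.2)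
instance (coorP : Int × Int) (colorP : String) (direction : Int × Int) (lstPieces : List (String × List (Int × Int))) (doOnce : Bool) : Decidable (Pre_deterLignediag coorP colorP direction lstPieces doOnce) := by unfold Pre_deterLignediag; infer_instance

def pvWitness_deterLignediag : (Int × Int) × String × (Int × Int) × (List (String × List (Int × Int))) × Bool :=
  ((0, 0), "white", (1, 1), [("pblack", [(3, 3)])], false)

def Spec_deterLignediag (coorP : Int × Int) (colorP : String) (direction : Int × Int) (lstPieces : List (String × List (Int × Int))) (doOnce : Bool) (out : List (Int × Int)) : Prop := out = deterLignediag_alt coorP colorP direction lstPieces doOnce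
instance (coorP : Int × Int) (colorP : String) (direction : Int × Int) (lstPieces : List (String × List (Int × Int))) (doOnce : Bool) (out : List (Int × Int)) : Decidable (Spec_deterLignediag coorP colorP direction lstPieces doOnce out) := by unfold Spec_deterLignediag; infer_instance

-- ===== CLAIM (what is proved, stated in full; the proofs are below) =====
def Claim_equal_deterLignediag : Prop := ∀ (coorP : Int × Int) (colorP : String) (direction : Int × Int) (lstPieces : List (String × List (Int × Int))) (doOnce : Bool), Dom_deterLignediag coorP colorP direction lstPieces doOnce → Pre_deterLignediag coorP colorP direction lstPieces doOnce → Spec_deterLignediag coorP colorP direction lstPieces doOnce (deterLignediag coorP colorP direction lstPieces doOnce)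

-- ===== LEMMAS AND PROOFS =====
-- the capture step A performs after its loop
def postCap (colorP : String) (st : List (Int × Int) × Int × Int × Option (String × (Int × Int))) : List (Int × Int) :=
  match st.2.2.2 with
  | some attackPiece =>
      if PySem.Str.slice attackPiece.1 (some 1) none ≠ colorP then st.1 ++ [(st.2.1, st.2.2.1)] else st.1
  | none => st.1

-- B's stage 3 as a function of the ray (definitionally the tail of deterLignediag_alt)
def procB (occ : PySem.Dict (Int × Int) String) (colorP : String) (ray : List (Int × Int)) : List (Int × Int) :=
  match firstHit occ ray 0 with
  | none => ray
  | some (i, sq) =>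
      let moves := ray.take i
      match occ.get? sq with
      | some c => if c ≠ colorP then moves ++ [sq] else moves
      | none => moves

lemma alt_eq (coorP : Int × Int) (colorP : String) (direction : Int × Int) (lstPieces : List (String × List (Int × Int))) (doOnce : Bool) :
    deterLignediag_alt coorP colorP direction lstPieces doOnce =
      procB (colorAt lstPieces) colorP (buildRay coorP.1 coorP.2 direction.1 direction.2 (if doOnce then 1 else 9) 1) := rfl

lemma firstHit_shift (occ : PySem.Dict (Int × Int) String) : ∀ (ray : List (Int × Int)) (i : Nat),
    firstHit occ ray (i + 1) = (firstHit occ ray i).map (fun p => (p.1 + 1, p.2))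
  | [], _ => rfl
  | sq :: rest, i => by
    by_cases h : (occ.get? sq).isSome <;> simp [firstHit, h, firstHit_shift occ rest (i + 1)]

lemma procB_cons_none (occ : PySem.Dict (Int × Int) String) (colorP : String) (sq : Int × Int)
    (rest : List (Int × Int)) (h : occ.get? sq = none) :
    procB occ colorP (sq :: rest) = sq :: procB occ colorP rest := by
  unfold procB
  rw [show firstHit occ (sq :: rest) 0 = firstHit occ rest 1 by simp [firstHit, h],
    show (1 : Nat) = 0 + 1 from rfl, firstHit_shift occ rest 0]
  cases hf : firstHit occ rest 0 with
  | none => simp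
  | some p =>
    rcases p with ⟨i, s⟩
    cases hs : occ.get? s with
    | none => simp [hs]
    | some c => by_cases hc : c ≠ colorP <;> simp [hs, hc]

lemma procB_cons_some (occ : PySem.Dict (Int × Int) String) (colorP : String) (sq : Int × Int)
    (rest : List (Int × Int)) (c : String) (h : occ.get? sq = some c) :
    procB occ colorP (sq :: rest) = if c ≠ colorP then [sq] else [] := by
  unfold procB
  rw [show firstHit occ (sq :: rest) 0 = some (0, sq) by simp [firstHit, h]]
  by_cases hc : c ≠ colorP <;> simp [h, hc]

lemma buildRay_shift (x y dx dy : Int) : ∀ (n k : Nat),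
    buildRay x y dx dy n (k + 1) = buildRay (x + dx) (y + dy) dx dy n k
  | 0, _ => rfl
  | n + 1, k => by
    have h1 : x + ((k : Int) + 1) * dx = (x + dx) + (k : Int) * dx := by ring
    have h2 : y + ((k : Int) + 1) * dy = (y + dy) + (k : Int) * dy := by ring
    simp only [buildRay, Nat.cast_add, Nat.cast_one, h1, h2, buildRay_shift x y dx dy n (k + 1)]

lemma inner_get? (c : Int × Int) (p : String) : ∀ (cs : List (Int × Int)) (d : PySem.Dict (Int × Int) String),
    (cs.foldl (fun d x => d.setdefault x p) d).get? c =
      match d.get? c with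
      | some v => some v
      | none => if c ∈ cs then some p else none
  | [], d => by cases h : d.get? c <;> simp [h]
  | a :: t, d => by
    rw [List.foldl_cons, inner_get? c p t (d.setdefault a p)]
    by_cases hc : c = a
    · subst hc
      rw [PySem.Dict.get?_setdefault_self]
      cases h : d.get? c <;> simp [h]
    · rw [PySem.Dict.get?_setdefault_of_ne d p hc]
      cases h : d.get? c <;> simp [h, hc]

lemma find?_beq (c : Int × Int) : ∀ cs : List (Int × Int),
    cs.find? (fun x => x == c) = if c ∈ cs then some c else none
  | [] => by simp
  | a :: t => by
    by_cases h : a = c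
    · subst h; simp [List.find?_cons]
    · simp [List.find?_cons, h, find?_beq c t, Ne.symm h]

lemma build_get? (c : Int × Int) : ∀ (lst : List (String × List (Int × Int))) (d : PySem.Dict (Int × Int) String),
    (lst.foldl (fun d pc => pc.2.foldl (fun d x => d.setdefault x (PySem.Str.slice pc.1 (some 1) none)) d) d).get? c =
      match d.get? c with
      | some v => some v
      | none => ((rpScan c lst).2).map (fun pr => PySem.Str.slice pr.1 (some 1) none)
  | [], d => by cases h : d.get? c <;> simp [h, rpScan]
  | (p, cs) :: rest, d => by
    rw [List.foldl_cons, build_get? c rest (cs.foldl (fun d x => d.setdefault x (PySem.Str.slice p (some 1) none)) d)]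
    rw [inner_get? c (PySem.Str.slice p (some 1) none) cs d]
    by_cases hm : c ∈ cs <;> cases h : d.get? c <;>
      simp [rpScan, find?_beq c cs, hm, h]

lemma occ_get? (c : Int × Int) (lst : List (String × List (Int × Int))) :
    (colorAt lst).get? c = ((rpScan c lst).2).map (fun pr => PySem.Str.slice pr.1 (some 1) none) := by
  rw [colorAt, build_get? c lst PySem.Dict.empty, PySem.Dict.get?_empty]

lemma rpScan_cases (c : Int × Int) : ∀ lst : List (String × List (Int × Int)),
    rpScan c lst = (true, none) ∨ ∃ p, rpScan c lst = (false, some (p, c))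
  | [] => Or.inl rfl
  | (p, cs) :: rest => by
    by_cases hm : c ∈ cs
    · right; exact ⟨p, by simp [rpScan, find?_beq c cs, hm]⟩
    · have := rpScan_cases c rest
      simpa [rpScan, find?_beq c cs, hm] using this

lemma rpScan_none_iff (c : Int × Int) : ∀ lst : List (String × List (Int × Int)),
    (rpScan c lst).2 = none ↔ ∀ pc ∈ lst, c ∉ pc.2
  | [] => by simp [rpScan]
  | (p, cs) :: rest => by
    by_cases hm : c ∈ cs <;> simp [rpScan, find?_beq c cs, hm, rpScan_none_iff c rest]

lemma main_loop (colorP : String) (dx dy : Int) (lst : List (String × List (Int × Int))) :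
    ∀ (n : Nat) (x y : Int) (acc : List (Int × Int)),
      (∃ k : Nat, k < n ∧ ¬ (0 ≤ x + ((k : Int) + 1) * dx ∧ x + ((k : Int) + 1) * dx ≤ 7 ∧
            0 ≤ y + ((k : Int) + 1) * dy ∧ y + ((k : Int) + 1) * dy ≤ 7 ∧
            (rpScan (x + ((k : Int) + 1) * dx, y + ((k : Int) + 1) * dy) lst).2 = none)) →
      postCap colorP (loopA dx dy lst false n acc (regardePiece (x + dx, y + dy) lst).1
          (regardePiece (x + dx, y + dy) lst).2 (x + dx) (y + dy)) =
        acc ++ procB (colorAt lst) colorP (buildRay x y dx dy n 1) := by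
  intro n
  induction n with
  | zero => intro x y acc ⟨k, hk, _⟩; omega
  | succ n ih =>
    intro x y acc ⟨k, hk, hnot⟩
    have hray : buildRay x y dx dy (n + 1) 1 =
        if 0 ≤ x + dx ∧ x + dx ≤ 7 ∧ 0 ≤ y + dy ∧ y + dy ≤ 7
        then (x + dx, y + dy) :: buildRay (x + dx) (y + dy) dx dy n 1
        else [] := by
      rw [show buildRay x y dx dy (n+1) 1 = if 0 ≤ x + (1:Int)*dx ∧ x + (1:Int)*dx ≤ 7 ∧ 0 ≤ y + (1:Int)*dy ∧ y + (1:Int)*dy ≤ 7 then (x + (1:Int)*dx, y + (1:Int)*dy) :: buildRay x y dx dy n 2 else [] from rfl]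
      rw [show (2 : Nat) = 1 + 1 from rfl, buildRay_shift x y dx dy n 1]
      simp
    by_cases hb : 0 ≤ x + dx ∧ x + dx ≤ 7 ∧ 0 ≤ y + dy ∧ y + dy ≤ 7
    · have hrp : regardePiece (x + dx, y + dy) lst = rpScan (x + dx, y + dy) lst := by
        simp [regardePiece]; omega
      rcases rpScan_cases (x + dx, y + dy) lst with hsc | ⟨p, hsc⟩
      · -- empty square: both sides append and continue
        have hocc : (colorAt lst).get? (x + dx, y + dy) = none := by
          rw [occ_get?, hsc]; rfl
        have hk0 : k ≠ 0 := by
          rintro rfl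
          simp only [Nat.cast_zero, zero_add, one_mul] at hnot
          exact hnot ⟨hb.1, hb.2.1, hb.2.2.1, hb.2.2.2, by simp [hsc]⟩
        obtain ⟨j, rfl⟩ := Nat.exists_eq_succ_of_ne_zero hk0
        have ih' := ih (x + dx) (y + dy) (acc ++ [(x + dx, y + dy)])
          ⟨j, by omega, by
            have h1 : (x + dx) + ((j : Int) + 1) * dx = x + (((j + 1 : Nat) : Int) + 1) * dx := by push_cast; ring
            have h2 : (y + dy) + ((j : Int) + 1) * dy = y + (((j + 1 : Nat) : Int) + 1) * dy := by push_cast; ring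
            rw [h1, h2]; exact hnot⟩
        rw [hray, if_pos hb, procB_cons_none _ _ _ _ hocc]
        simp only [loopA, hrp, hsc]
        rw [if_pos trivial, if_neg (by simp : ¬(false = true))]
        rw [ih']
        simp
      · -- occupied square: capture check, both stop
        have hocc : (colorAt lst).get? (x + dx, y + dy) = some (PySem.Str.slice p (some 1) none) := by
          rw [occ_get?, hsc]; rfl
        rw [hray, if_pos hb, procB_cons_some _ _ _ _ _ hocc]
        simp only [loopA, hrp, hsc, postCap]
        by_cases hc : PySem.Str.slice p (some 1) none ≠ colorP <;> simp [hc, postCap]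
    · -- off board: both stop with no capture
      have hrp : regardePiece (x + dx, y + dy) lst = (false, none) := by
        simp [regardePiece]; omega
      rw [hray, if_neg hb]
      simp only [loopA, hrp]
      simp [postCap, procB, firstHit]

lemma once_loop (colorP : String) (dx dy : Int) (lst : List (String × List (Int × Int))) (x y : Int) :
    postCap colorP (loopA dx dy lst true 9 [] (regardePiece (x + dx, y + dy) lst).1
        (regardePiece (x + dx, y + dy) lst).2 (x + dx) (y + dy)) =
      procB (colorAt lst) colorP (buildRay x y dx dy 1 1) := by
  have hray : buildRay x y dx dy 1 1 =
      if 0 ≤ x + dx ∧ x + dx ≤ 7 ∧ 0 ≤ y + dy ∧ y + dy ≤ 7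
      then [(x + dx, y + dy)] else [] := by
    simp [buildRay]
  by_cases hb : 0 ≤ x + dx ∧ x + dx ≤ 7 ∧ 0 ≤ y + dy ∧ y + dy ≤ 7
  · have hrp : regardePiece (x + dx, y + dy) lst = rpScan (x + dx, y + dy) lst := by
      simp [regardePiece]; omega
    rcases rpScan_cases (x + dx, y + dy) lst with hsc | ⟨p, hsc⟩
    · have hocc : (colorAt lst).get? (x + dx, y + dy) = none := by rw [occ_get?, hsc]; rfl
      rw [hray, if_pos hb, procB_cons_none _ _ _ _ hocc]
      show postCap colorP (loopA dx dy lst true (8+1) [] _ _ _ _) = _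
      simp only [loopA, hrp, hsc]
      simp [postCap, procB, firstHit]
    · have hocc : (colorAt lst).get? (x + dx, y + dy) = some (PySem.Str.slice p (some 1) none) := by
        rw [occ_get?, hsc]; rfl
      rw [hray, if_pos hb, procB_cons_some _ _ _ _ _ hocc]
      show postCap colorP (loopA dx dy lst true (8+1) [] _ _ _ _) = _
      simp only [loopA, hrp, hsc]
      rw [if_neg (by simp : ¬(false = true))]
      by_cases hc : PySem.Str.slice p (some 1) none ≠ colorP <;> simp [hc, postCap]
  · have hrp : regardePiece (x + dx, y + dy) lst = (false, none) := by
      simp [regardePiece]; omega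
    rw [hray, if_neg hb]
    show postCap colorP (loopA dx dy lst true (8+1) [] _ _ _ _) = _
    simp only [loopA, hrp]
    rw [if_neg (by simp : ¬(false = true))]
    simp [postCap, procB, firstHit]

lemma exists_stop (x y dx dy : Int) (lst : List (String × List (Int × Int))) (h : dx ≠ 0 ∨ dy ≠ 0) :
    ∃ k : Nat, k < 9 ∧ ¬ (0 ≤ x + ((k : Int) + 1) * dx ∧ x + ((k : Int) + 1) * dx ≤ 7 ∧
        0 ≤ y + ((k : Int) + 1) * dy ∧ y + ((k : Int) + 1) * dy ≤ 7 ∧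
        (rpScan (x + ((k : Int) + 1) * dx, y + ((k : Int) + 1) * dy) lst).2 = none) := by
  by_cases h0 : 0 ≤ x + dx ∧ x + dx ≤ 7 ∧ 0 ≤ y + dy ∧ y + dy ≤ 7
  · refine ⟨8, by omega, fun hc => ?_⟩
    have := hc.1; have := hc.2.1; have := hc.2.2.1; have := hc.2.2.2.1
    push_cast at *
    rcases h with h | h <;> omega
  · refine ⟨0, by omega, fun hc => h0 ?_⟩
    simp only [Nat.cast_zero, zero_add, one_mul] at hc
    exact ⟨hc.1, hc.2.1, hc.2.2.1, hc.2.2.2.1⟩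

-- ===== VERDICT (by name: the statement is the Claim_ definition above) =====
theorem deterLignediag_spec : Claim_equal_deterLignediag := by
  intro coorP colorP direction lstPieces doOnce _hdom hpre
  unfold Spec_deterLignediag
  have hA : deterLignediag coorP colorP direction lstPieces doOnce =
      postCap colorP (loopA direction.1 direction.2 lstPieces doOnce 9 []
        (regardePiece (coorP.1 + direction.1, coorP.2 + direction.2) lstPieces).1
        (regardePiece (coorP.1 + direction.1, coorP.2 + direction.2) lstPieces).2
        (coorP.1 + direction.1) (coorP.2 + direction.2)) := rfl
  rw [alt_eq, hA]
  cases doOnce with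
  | true =>
    rw [if_pos rfl]
    exact once_loop colorP direction.1 direction.2 lstPieces coorP.1 coorP.2
  | false =>
    rw [if_neg (by simp : ¬(false = true))]
    rw [show (procB (colorAt lstPieces) colorP (buildRay coorP.1 coorP.2 direction.1 direction.2 9 1)) = [] ++ procB (colorAt lstPieces) colorP (buildRay coorP.1 coorP.2 direction.1 direction.2 9 1) by simp]
    apply main_loop
    by_cases hdir : direction.1 ≠ 0 ∨ direction.2 ≠ 0
    · exact exists_stop coorP.1 coorP.2 direction.1 direction.2 lstPieces hdir
    · push_neg at hdir
      rcases hpre with h | h | h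
      · exact absurd h (by simp)
      · exact absurd (Prod.ext_iff.mpr ⟨hdir.1, hdir.2⟩) h
      · refine ⟨0, by omega, fun hc => h ?_⟩
        simp only [hdir.1, hdir.2, mul_zero, add_zero] at hc
        exact ⟨hc.1, hc.2.1, hc.2.2.1, hc.2.2.2.1,
          by have := (rpScan_none_iff coorP lstPieces).mp (by simpa using hc.2.2.2.2); exact this⟩
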